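-- pv_equiv track=rewrite | github.com/TTzPontte/tax-returns | src/ir_scripts/common_layers/helpers/utils.py | format_br_doc
-- ===== SOURCE A (Python) =====
-- def format_br_doc(doc_number):
--     doc_number = ''.join(c for c in doc_number if c.isdigit())
--     if len(doc_number) == 11:
--         formatted_doc = '{}.{}.{}-{}'.format(doc_number[:3], doc_number[3:6], doc_number[6:9], doc_number[9:11])
--         return formatted_doc
--     elif len(doc_number) == 14:
--         formatted_doc = '{}.{}.{}/{}-{}'.format(doc_number[:2], doc_number[2:5], doc_number[5:8], doc_number[8:12],
--                                                 doc_number[12:14])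
--         return formatted_doc
--     else:
--         return "Invalid document number."
-- ===== SOURCE B (Python) =====
-- def format_br_doc(doc_number):
--     digits = ''.join(c for c in doc_number if c.isdigit())
--     masks = {11: '###.###.###-##', 14: '##.###.###/####-##'}
--     mask = masks.get(len(digits))
--     if mask is None:
--         return "Invalid document number."
--     out = []
--     it = iter(digits)
--     for ch in mask:
--         out.append(next(it) if ch == '#' else ch)
--     return ''.join(out)
-- ===== Notes on version B (the rewrite author's own statement) =====
-- stated objective: alternative
-- what changed: B replaces per-length slicing plus str.format with a single mask-template walk that interleaves the filtered digits with the separator characters.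
import Mathlib
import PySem

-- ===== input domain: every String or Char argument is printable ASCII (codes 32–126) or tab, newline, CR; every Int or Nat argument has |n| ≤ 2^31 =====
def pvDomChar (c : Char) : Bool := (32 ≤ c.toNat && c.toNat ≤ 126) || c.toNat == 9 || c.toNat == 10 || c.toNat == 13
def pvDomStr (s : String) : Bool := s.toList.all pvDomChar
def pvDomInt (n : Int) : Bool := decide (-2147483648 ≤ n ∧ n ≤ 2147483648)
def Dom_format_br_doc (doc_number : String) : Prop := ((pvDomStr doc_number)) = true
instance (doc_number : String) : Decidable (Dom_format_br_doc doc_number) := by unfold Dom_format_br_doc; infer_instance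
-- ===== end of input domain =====

-- B formats via one mask-template walk instead of per-length slicing + format; alternative decomposition, same cost.

-- ===== PORT A =====
def format_br_doc (doc_number : String) : String :=
  let ds : List Char := doc_number.toList.filter PySem.Chars.isdigit
  if ds.length = 11 then
    String.ofList (PySem.List.slice ds none (some 3) ++ ['.'] ++
               PySem.List.slice ds (some 3) (some 6) ++ ['.'] ++
               PySem.List.slice ds (some 6) (some 9) ++ ['-'] ++
               PySem.List.slice ds (some 9) (some 11))
  else if ds.length = 14 then
    String.ofList (PySem.List.slice ds none (some 2) ++ ['.'] ++
               PySem.List.slice ds (some 2) (some 5) ++ ['.'] ++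
               PySem.List.slice ds (some 5) (some 8) ++ ['/'] ++
               PySem.List.slice ds (some 8) (some 12) ++ ['-'] ++
               PySem.List.slice ds (some 12) (some 14))
  else "Invalid document number."

-- ===== PORT B =====
-- walk the mask, '#' takes the next digit (next(it)); a '#' with no digit left cannot
-- occur for the masks B uses (mask has exactly len(digits) '#'s), modelled as skipping
def maskFill : List Char → List Char → List Char
  | [], _ => []
  | m :: ms, ds =>
    if m = '#' then
      match ds with
      | d :: ds' => d :: maskFill ms ds'
      | [] => maskFill ms []
    else m :: maskFill ms ds

def format_br_doc_alt (doc_number : String) : String :=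
  let ds : List Char := doc_number.toList.filter PySem.Chars.isdigit
  let mask? : Option (List Char) :=
    if ds.length = 11 then some "###.###.###-##".toList
    else if ds.length = 14 then some "##.###.###/####-##".toList
    else none
  match mask? with
  | none => "Invalid document number."
  | some m => String.ofList (maskFill m ds)

-- ===== PRECONDITION & SPEC =====
def Spec_format_br_doc (doc_number : String) (out : String) : Prop := out = format_br_doc_alt doc_number
instance (doc_number : String) (out : String) : Decidable (Spec_format_br_doc doc_number out) := by unfold Spec_format_br_doc; infer_instance

-- ===== CLAIM (what is proved, stated in full; the proofs are below) =====
def Claim_equal_format_br_doc : Prop := ∀ (doc_number : String), Dom_format_br_doc doc_number → Spec_format_br_doc doc_number (format_br_doc doc_number)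

-- ===== LEMMAS AND PROOFS =====
lemma eq11 (ds : List Char) (h : ds.length = 11) :
    PySem.List.slice ds none (some 3) ++ ['.'] ++
    PySem.List.slice ds (some 3) (some 6) ++ ['.'] ++
    PySem.List.slice ds (some 6) (some 9) ++ ['-'] ++
    PySem.List.slice ds (some 9) (some 11) =
    maskFill "###.###.###-##".toList ds := by
  match ds, h with
  | [a,b,c,d,e,f,g,h',i,j,k], _ => rfl

lemma eq14 (ds : List Char) (h : ds.length = 14) :
    PySem.List.slice ds none (some 2) ++ ['.'] ++
    PySem.List.slice ds (some 2) (some 5) ++ ['.'] ++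
    PySem.List.slice ds (some 5) (some 8) ++ ['/'] ++
    PySem.List.slice ds (some 8) (some 12) ++ ['-'] ++
    PySem.List.slice ds (some 12) (some 14) =
    maskFill "##.###.###/####-##".toList ds := by
  match ds, h with
  | [a,b,c,d,e,f,g,h',i,j,k,l,m,n], _ => rfl

-- ===== VERDICT (by name: the statement is the Claim_ definition above) =====
theorem format_br_doc_spec : Claim_equal_format_br_doc := by
  intro doc _
  unfold Spec_format_br_doc format_br_doc format_br_doc_alt
  set ds := doc.toList.filter PySem.Chars.isdigit with hds
  by_cases h11 : ds.length = 11
  · simp only [h11, if_true]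
    rw [eq11 ds h11]
  · by_cases h14 : ds.length = 14
    · simp only [h14]
      rw [if_neg (by decide : ¬ (14 = 11)), if_neg (by decide : ¬ (14 = 11))]
      rw [eq14 ds h14]
      simp only [if_true]
    · simp only [if_neg h11, if_neg h14]
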